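-- pv_equiv track=rewrite | github.com/vvrmahendra/DS-AlgoPrac | queues/nInt123.py | solve
-- ===== SOURCE A (Python) =====
-- def solve(A):
--     if A <= 3:
--         return [i+1 for i in range(A)]
--     from collections import deque
--     Q = deque()
--     ans = []
--     Q.append(1)
--     Q.append(2)
--     Q.append(3)
--     n = 3
--     while n < A:
--         temp = Q.popleft()
--         ans.append(temp)
--         Q.append(10*temp+1)
--         n += 1
--         if n < A:
--             Q.append(10*temp+2)
--             n += 1
--         if n < A:
--             Q.append(10*temp+3)
--             n += 1
--
--     while Q:
--         ans.append(Q.popleft())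
--
--     return ans
-- ===== SOURCE B (Python) =====
-- def solve(A):
--     # closed form: the k-th number (1-based) is k written in bijective base 3
--     # with digits 1,2,3 read as decimal digits
--     res = []
--     for k in range(1, A + 1):
--         num = 0
--         mul = 1
--         m = k
--         while m > 0:
--             m, r = divmod(m - 1, 3)
--             num += (r + 1) * mul
--             mul *= 10
--         res.append(num)
--     return res
-- ===== Notes on version B (the rewrite author's own statement) =====
-- stated objective: simpler
-- what changed: Replaced the BFS deque with per-push counting by a closed-form computation: the k-th element is k written in bijective base 3 (digits 1,2,3), computed directly for each index k = 1..A.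
import Mathlib
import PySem

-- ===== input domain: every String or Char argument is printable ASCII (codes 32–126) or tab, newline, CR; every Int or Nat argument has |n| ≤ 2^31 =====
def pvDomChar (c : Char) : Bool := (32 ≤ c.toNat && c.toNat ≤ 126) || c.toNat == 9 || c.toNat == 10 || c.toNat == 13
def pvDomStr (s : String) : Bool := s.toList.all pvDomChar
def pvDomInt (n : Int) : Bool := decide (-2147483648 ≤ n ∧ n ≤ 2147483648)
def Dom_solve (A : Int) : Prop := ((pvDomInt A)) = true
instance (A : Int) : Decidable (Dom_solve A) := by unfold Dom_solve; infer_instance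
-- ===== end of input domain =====

-- B replaces A's BFS queue by a closed-form per-index computation (bijective base-3), for a simpler, queue-free implementation.

-- ===== PORT A =====
-- the while-loop: state (Q, ans, n); each iteration pops the head, appends up to
-- three children guarded by n < A; when n < A fails, returns ans ++ Q (the flush loop).
-- The [] branch is unreachable (the queue never empties while n < A); Python would raise there.
def solveLoop (A : Int) (Q ans : List Int) (n : Int) : List Int :=
  if n < A then
    match Q with
    | [] => ans
    | t :: Q' =>
      let Q1 := Q' ++ [10*t+1]
      if n + 1 < A then
        let Q2 := Q1 ++ [10*t+2]
        if n + 2 < A then solveLoop A (Q2 ++ [10*t+3]) (ans ++ [t]) (n+3)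
        else solveLoop A Q2 (ans ++ [t]) (n+2)
      else solveLoop A Q1 (ans ++ [t]) (n+1)
  else ans ++ Q
termination_by (A - n).toNat
decreasing_by all_goals omega

def solve (A : Int) : List Int :=
  if A ≤ 3 then (PySem.List.pyRange 0 A 1).map (fun i => i + 1)
  else solveLoop A [1, 2, 3] [] 3

-- ===== PORT B =====
-- the inner while loop of Source B: m > 0 always and Python's divmod(m-1, 3) on the
-- nonnegative m-1 is Nat division/remainder (PySem.Int.floordiv_natCast/mod_natCast),
-- so the loop variable m is carried as a Nat.
def bij3Loop (m : Nat) (num mul : Int) : Int :=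
  if m = 0 then num
  else bij3Loop ((m - 1) / 3) (num + (((m - 1) % 3 : Nat) + 1) * mul) (mul * 10)
termination_by m
decreasing_by omega

def solve_alt (A : Int) : List Int :=
  (PySem.List.pyRange 1 (A + 1) 1).map (fun k => bij3Loop k.toNat 0 1)

-- ===== PRECONDITION & SPEC =====
def Spec_solve (A : Int) (out : List Int) : Prop := out = solve_alt A
instance (A : Int) (out : List Int) : Decidable (Spec_solve A out) := by unfold Spec_solve; infer_instance

-- ===== CLAIM (what is proved, stated in full; the proofs are below) =====
def Claim_equal_solve : Prop := ∀ (A : Int), Dom_solve A → Spec_solve A (solve A)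

-- ===== LEMMAS AND PROOFS =====

-- the k-th number with digits in {1,2,3} (1-based): k in bijective base 3
def bij3 : Nat → Int
  | 0 => 0
  | m + 1 => 10 * bij3 (m / 3) + ((m % 3 : Nat) + 1)

lemma bij3Loop_eq (m : Nat) : ∀ num mul : Int, bij3Loop m num mul = num + mul * bij3 m := by
  induction m using Nat.strong_induction_on with
  | _ m ih =>
    intro num mul
    match m with
    | 0 => simp [bij3Loop, bij3]
    | m' + 1 =>
      rw [bij3Loop]
      simp only [Nat.add_sub_cancel, if_neg (Nat.succ_ne_zero m')]
      rw [ih (m' / 3) (by omega)]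
      show num + (((m' % 3 : Nat) : Int) + 1) * mul + mul * 10 * bij3 (m' / 3)
          = num + mul * bij3 (m' + 1)
      rw [bij3]
      ring

lemma bij3_child (k d : Nat) (h1 : 1 ≤ d) (h3 : d ≤ 3) :
    bij3 (3 * k + d) = 10 * bij3 k + (d : Int) := by
  have he : 3 * k + d = (3 * k + (d - 1)) + 1 := by omega
  rw [he, bij3]
  have hq : (3 * k + (d - 1)) / 3 = k := by omega
  have hr : (3 * k + (d - 1)) % 3 = d - 1 := by omega
  rw [hq, hr]
  have : ((d - 1 : Nat) : Int) + 1 = (d : Int) := by omega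
  omega

lemma bij3_one : bij3 1 = 1 := by simp [bij3]
lemma bij3_two : bij3 2 = 2 := by simp [bij3]
lemma bij3_three : bij3 3 = 3 := by simp [bij3]

lemma seg_snoc (s c : Nat) :
    (List.range' s c).map bij3 ++ [bij3 (s + c)] = (List.range' s (c + 1)).map bij3 := by
  rw [List.range'_1_concat (s := s) (n := c), List.map_append, List.map_singleton]

-- the end case of the loop: n = A, return ans ++ Q
lemma solveLoop_end (A : Int) (p n : Nat) (hpn : p ≤ n) (hA : (n : Int) = A) :
    solveLoop A ((List.range' (p + 1) (n - p)).map bij3) ((List.range' 1 p).map bij3) n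
      = (List.range' 1 A.toNat).map bij3 := by
  rw [solveLoop.eq_def, if_neg (by omega)]
  rw [← List.map_append, show p + 1 = 1 + p from by omega, List.range'_append_1,
    show p + (n - p) = n from by omega, show A.toNat = n from by omega]

-- loop invariant: ans = bij3[1..p], Q = bij3[p+1..n], and either n = 3p+3 (all
-- children of popped nodes pushed) or n = A (the loop is about to stop)
lemma solveLoop_inv (A : Int) (fuel : Nat) : ∀ (p n : Nat), (A - n).toNat ≤ fuel → p ≤ n →
    (n : Int) ≤ A → (n = 3 * p + 3 ∨ (n : Int) = A) →
    solveLoop A ((List.range' (p + 1) (n - p)).map bij3) ((List.range' 1 p).map bij3) n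
      = (List.range' 1 A.toNat).map bij3 := by
  induction fuel with
  | zero =>
    intro p n hf hpn hle _
    exact solveLoop_end A p n hpn (by omega)
  | succ fuel ih =>
    intro p n hf hpn hle hdisj
    by_cases hlt : (n : Int) < A
    · have hn : n = 3 * p + 3 := by omega
      -- the queue is nonempty: peel its head bij3 (p+1)
      have hcnt : n - p = (2 * p + 2) + 1 := by omega
      rw [hcnt, List.range'_succ, List.map_cons]
      rw [solveLoop, if_pos hlt]
      simp only
      -- children values are the next indices
      have hc1 : 10 * bij3 (p + 1) + 1 = bij3 (n + 1) := by
        rw [show n + 1 = 3 * (p + 1) + 1 by omega, bij3_child (p+1) 1 (by omega) (by omega)]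
        norm_num
      have hc2 : 10 * bij3 (p + 1) + 2 = bij3 (n + 2) := by
        rw [show n + 2 = 3 * (p + 1) + 2 by omega, bij3_child (p+1) 2 (by omega) (by omega)]
        norm_num
      have hc3 : 10 * bij3 (p + 1) + 3 = bij3 (n + 3) := by
        rw [show n + 3 = 3 * (p + 1) + 3 by omega, bij3_child (p+1) 3 (by omega) (by omega)]
        norm_num
      have hans : (List.range' 1 p).map bij3 ++ [bij3 (p + 1)]
          = (List.range' 1 (p + 1)).map bij3 := by
        rw [List.range'_1_concat (s := 1) (n := p), List.map_append, List.map_singleton]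
        simp [Nat.add_comm 1 p]
      have hQ1 : (List.range' (p + 1 + 1) (2 * p + 2)).map bij3 ++ [bij3 (n + 1)]
          = (List.range' ((p + 1) + 1) ((n + 1) - (p + 1))).map bij3 := by
        rw [show (n + 1) - (p + 1) = (2 * p + 2) + 1 by omega,
          show n + 1 = (p + 1 + 1) + (2 * p + 2) by omega]
        exact seg_snoc _ _
      by_cases h1 : (n : Int) + 1 < A
      · rw [if_pos h1]
        have hQ2 : (List.range' ((p + 1) + 1) ((n + 1) - (p + 1))).map bij3 ++ [bij3 (n + 2)]
            = (List.range' ((p + 1) + 1) ((n + 2) - (p + 1))).map bij3 := by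
          rw [show (n + 1) - (p + 1) = 2 * p + 3 by omega,
            show (n + 2) - (p + 1) = (2 * p + 3) + 1 by omega,
            show n + 2 = (p + 1 + 1) + (2 * p + 3) by omega]
          exact seg_snoc _ _
        by_cases h2 : (n : Int) + 2 < A
        · rw [if_pos h2]
          have hQ3 : (List.range' ((p + 1) + 1) ((n + 2) - (p + 1))).map bij3 ++ [bij3 (n + 3)]
              = (List.range' ((p + 1) + 1) ((n + 3) - (p + 1))).map bij3 := by
            rw [show (n + 2) - (p + 1) = 2 * p + 4 by omega,
              show (n + 3) - (p + 1) = (2 * p + 4) + 1 by omega,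
              show n + 3 = (p + 1 + 1) + (2 * p + 4) by omega]
            exact seg_snoc _ _
          rw [hc1, hc2, hc3, hQ1, hQ2, hQ3, hans,
            show ((n : Int) + 3) = ((n + 3 : Nat) : Int) by push_cast; ring]
          exact ih (p + 1) (n + 3) (by omega) (by omega) (by omega) (by omega)
        · rw [if_neg h2]
          rw [hc1, hc2, hQ1, hQ2, hans,
            show ((n : Int) + 2) = ((n + 2 : Nat) : Int) by push_cast; ring]
          exact ih (p + 1) (n + 2) (by omega) (by omega) (by omega) (by omega)
      · rw [if_neg h1]
        rw [hc1, hQ1, hans, show ((n : Int) + 1) = ((n + 1 : Nat) : Int) by push_cast; ring]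
        exact ih (p + 1) (n + 1) (by omega) (by omega) (by omega) (by omega)
    · exact solveLoop_end A p n hpn (by omega)

lemma solve_alt_eq (A : Int) : solve_alt A = (List.range' 1 A.toNat).map bij3 := by
  unfold solve_alt
  rw [PySem.List.pyRange_one, List.range'_eq_map_range, List.map_map, List.map_map]
  rw [show (A + 1 - 1).toNat = A.toNat from by omega]
  apply List.map_congr_left
  intro k _
  show bij3Loop (1 + (k : Int)).toNat 0 1 = bij3 (1 + k)
  rw [show (1 + (k : Int)).toNat = 1 + k from by omega, bij3Loop_eq]
  ring

-- ===== VERDICT (by name: the statement is the Claim_ definition above) =====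
theorem solve_spec : Claim_equal_solve := by
  intro A _
  show solve A = solve_alt A
  rw [solve_alt_eq]
  unfold solve
  by_cases h3 : A ≤ 3
  · by_cases h0 : A ≤ 0
    · rw [if_pos h3, PySem.List.pyRange_one_eq_nil h0,
        show A.toNat = 0 from by omega]
      simp
    · interval_cases A <;> norm_num [PySem.List.pyRange_one, List.range', List.range_succ, show (2:Int).toNat = 2 from rfl, show (3:Int).toNat = 3 from rfl, show (1:Int).toNat = 1 from rfl, bij3_one, bij3_two, bij3_three]
  · rw [if_neg h3]
    have := solveLoop_inv A (A - 3).toNat 0 3 (by omega) (by omega) (by omega) (by omega)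
    simpa [List.range', bij3_one, bij3_two, bij3_three] using this
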